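-- pv_equiv track=rewrite | github.com/SchuhbauerChristoph/dbs-visualization | distribution_v3.py | iterative_histo_grid
-- ===== SOURCE A (Python) =====
-- import copy
--
-- def iterative_histo_grid(histo_grid, gridpoints):
--     if gridpoints == []:
--         return histo_grid
--     else:
--         temp = []
--         for x in histo_grid:
--             for i in range(len(gridpoints[0])):
--                 y = copy.copy(x)
--                 y.append(gridpoints[0][i])
--                 temp.append(y)
--         return iterative_histo_grid(temp, gridpoints[1:])
-- ===== SOURCE B (Python) =====
-- def iterative_histo_grid(histo_grid, gridpoints):
--     result = histo_grid
--     for dim in gridpoints: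
--         result = [row + [v] for row in result for v in dim]
--     return result
-- ===== Notes on version B (the rewrite author's own statement) =====
-- stated objective: simpler
-- what changed: Replaces the tail recursion with explicit copy/append row building by a flat iterative loop over the dimensions using a list comprehension (row + [v]) per step.
import Mathlib
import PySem

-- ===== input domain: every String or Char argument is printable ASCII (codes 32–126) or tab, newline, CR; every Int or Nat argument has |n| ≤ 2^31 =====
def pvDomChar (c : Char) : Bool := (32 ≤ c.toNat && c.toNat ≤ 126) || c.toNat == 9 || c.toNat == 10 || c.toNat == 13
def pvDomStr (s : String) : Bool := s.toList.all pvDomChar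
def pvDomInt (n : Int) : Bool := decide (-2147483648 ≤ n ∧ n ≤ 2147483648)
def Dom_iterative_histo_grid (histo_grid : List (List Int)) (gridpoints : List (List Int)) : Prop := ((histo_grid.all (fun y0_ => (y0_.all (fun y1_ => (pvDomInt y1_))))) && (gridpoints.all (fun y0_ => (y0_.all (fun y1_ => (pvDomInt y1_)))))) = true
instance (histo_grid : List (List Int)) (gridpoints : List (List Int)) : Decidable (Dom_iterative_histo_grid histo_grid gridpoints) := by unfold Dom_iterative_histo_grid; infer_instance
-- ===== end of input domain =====

-- B replaces A's tail recursion (with explicit copy/append row building) by a flat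
-- iterative loop over the dimensions with a comprehension per step (objective: simpler).

-- ===== PORT A =====
-- A's inner 'for i in range(len(gridpoints[0])): y = copy.copy(x); y.append(gridpoints[0][i])'
-- iterates the elements of gridpoints[0] in order; ported as a fold over that list (exact:
-- every index i is in range, so gridpoints[0][i] is just the i-th element).
def iterative_histo_grid (histo_grid : List (List Int)) (gridpoints : List (List Int)) : List (List Int) :=
  match gridpoints with
  | [] => histo_grid
  | g0 :: rest =>
      let temp := histo_grid.foldl
        (fun acc x => g0.foldl (fun acc2 v => acc2 ++ [x ++ [v]]) acc) []
      iterative_histo_grid temp rest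

-- ===== PORT B =====
-- result = histo_grid; for dim in gridpoints: result = [row + [v] for row in result for v in dim]
def iterative_histo_grid_alt (histo_grid : List (List Int)) (gridpoints : List (List Int)) : List (List Int) :=
  gridpoints.foldl (fun result dim => result.flatMap (fun row => dim.map (fun v => row ++ [v]))) histo_grid

-- ===== PRECONDITION & SPEC =====
def Spec_iterative_histo_grid (histo_grid : List (List Int)) (gridpoints : List (List Int)) (out : List (List Int)) : Prop := out = iterative_histo_grid_alt histo_grid gridpoints
instance (histo_grid : List (List Int)) (gridpoints : List (List Int)) (out : List (List Int)) : Decidable (Spec_iterative_histo_grid histo_grid gridpoints out) := by unfold Spec_iterative_histo_grid; infer_instance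

-- ===== CLAIM (what is proved, stated in full; the proofs are below) =====
def Claim_equal_iterative_histo_grid : Prop := ∀ (histo_grid : List (List Int)) (gridpoints : List (List Int)), Dom_iterative_histo_grid histo_grid gridpoints → Spec_iterative_histo_grid histo_grid gridpoints (iterative_histo_grid histo_grid gridpoints)

-- ===== LEMMAS AND PROOFS =====

theorem inner_fold_append (g : List Int) (x : List Int) (acc : List (List Int)) :
    g.foldl (fun acc2 v => acc2 ++ [x ++ [v]]) acc = acc ++ g.map (fun v => x ++ [v]) := by
  induction g generalizing acc with
  | nil => simp
  | cons v g ih => simp [List.foldl, ih]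

theorem outer_fold_flatMap (hg : List (List Int)) (g : List Int) (acc : List (List Int)) :
    hg.foldl (fun acc x => g.foldl (fun acc2 v => acc2 ++ [x ++ [v]]) acc) acc
      = acc ++ hg.flatMap (fun x => g.map (fun v => x ++ [v])) := by
  induction hg generalizing acc with
  | nil => simp
  | cons x hg ih =>
      rw [List.foldl_cons, inner_fold_append, ih]
      simp [List.flatMap_cons, List.append_assoc]

theorem ihg_eq (gridpoints : List (List Int)) : ∀ (histo_grid : List (List Int)),
    iterative_histo_grid histo_grid gridpoints = iterative_histo_grid_alt histo_grid gridpoints := by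
  induction gridpoints with
  | nil => intro hg; rfl
  | cons g rest ih =>
      intro hg
      rw [iterative_histo_grid, ih, iterative_histo_grid_alt, iterative_histo_grid_alt, List.foldl_cons]
      congr 1
      rw [outer_fold_flatMap]
      simp [List.flatMap]

-- ===== VERDICT (by name: the statement is the Claim_ definition above) =====
theorem iterative_histo_grid_spec : Claim_equal_iterative_histo_grid := by
  intro hg gp _
  exact ihg_eq gp hg
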